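-- pv_equiv track=rewrite | github.com/gradgrind/WZ | wz/grades/makereports.py | group_grades
-- ===== SOURCE A (Python) =====
-- from typing import List, Dict, Set, Tuple
-- from typing import Dict, List  # , Optional, Any, Set, Tuple
--
-- _INVALID_SUBJECT_KEY = "Ungültiges Fach-Feld in Vorlage: {key}"
--
-- def group_grades(all_keys: Set[str]) -> Tuple[Set[str], Dict[str, List[str]]]:
--     """Determine the subject and grade slots in the template.
--     <all_keys> is the complete set of template slots/keys.
--     Keys of the form 'G.k.n' are sought: k is the group-tag, n is a number.
--     Return a mapping {group-tag -> [index, ...]}.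
--     The index lists are sorted reverse-alphabetically (for popping).
--     Note that the indexes are <str> values, not <int>.
--     Also keys of the form 'g.sid' are collected as a set..
--     """
--     #    G_REGEXP = re.compile(r'G\.([A-Za-z]+)\.([0-9]+)$')
--     tags: Dict[str, List[str]] = {}
--     subjects: Set[str] = set()
--     for key in all_keys:
--         if key.startswith("G."):
--             # G.<group tag>.<index>
--             try:
--                 tag, index = key[2:].rsplit(".", 1)
--             except ValueError:
--                 raise GradeReportError(_INVALID_SUBJECT_KEY.format(key=key))
--             try:
--                 tags[tag].add(index)
--             except KeyError:
--                 tags[tag] = {index}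
--         elif key.startswith("g."):
--             # g.<subject tag>
--             subjects.add(key[2:])
--     tagmap: Dict[str, List[str]] = {
--         tag: sorted(ilist, reverse=True) for tag, ilist in tags.items()
--     }
--     return subjects, tagmap
-- ===== SOURCE B (Python) =====
-- _INVALID_SUBJECT_KEY = "Ungültiges Fach-Feld in Vorlage: {key}"
--
-- def group_grades(all_keys):
--     """Single collection pass, then ONE global reverse sort of all (tag, index)
--     pairs and a grouping comprehension; A instead keeps a set per tag and
--     sorts each bucket separately."""
--     subjects = set()
--     pairs = []
--     for key in all_keys:
--         if key.startswith("G."):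
--             try:
--                 tag, index = key[2:].rsplit(".", 1)
--             except ValueError:
--                 raise GradeReportError(_INVALID_SUBJECT_KEY.format(key=key))
--             pairs.append((tag, index))
--         elif key.startswith("g."):
--             subjects.add(key[2:])
--     spairs = sorted(dict.fromkeys(pairs), key=lambda p: p[1], reverse=True)
--     tagmap = {
--         tag: [i for t, i in spairs if t == tag]
--         for tag in dict.fromkeys(t for t, _ in pairs)
--     }
--     return subjects, tagmap
-- ===== Notes on version B (the rewrite author's own statement) =====
-- stated objective: alternative
-- what changed: A accumulates a per-tag set in a dict and then sorts every bucket separately; B collects a flat (tag,index) pair list in one pass, deduplicates it, sorts it ONCE globally by index in reverse, and builds each bucket by a grouping comprehension over the already-sorted list, so no per-bucket sort exists.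
import Mathlib
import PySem

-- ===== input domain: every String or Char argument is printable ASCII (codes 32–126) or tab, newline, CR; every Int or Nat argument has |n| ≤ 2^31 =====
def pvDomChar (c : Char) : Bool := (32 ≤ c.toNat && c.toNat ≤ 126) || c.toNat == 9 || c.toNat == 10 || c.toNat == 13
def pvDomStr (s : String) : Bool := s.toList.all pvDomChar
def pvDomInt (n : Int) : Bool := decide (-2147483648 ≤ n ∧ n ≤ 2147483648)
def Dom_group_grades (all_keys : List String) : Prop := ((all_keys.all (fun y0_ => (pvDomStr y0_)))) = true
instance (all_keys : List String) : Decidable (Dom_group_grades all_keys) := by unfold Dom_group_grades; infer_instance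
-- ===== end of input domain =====

-- B replaces A's per-tag sets + per-bucket sorts by one flat pair list, one global
-- reverse sort and a grouping comprehension (alternative decomposition, same results).

-- shared helper: s.rsplit(".", 1) expected to give exactly two parts, i.e. split at the
-- LAST '.'; none exactly where Python raises ValueError ('.' absent). Exact by construction.
def rsplitDot : List Char → Option (List Char × List Char)
  | [] => none
  | c :: rest =>
    match rsplitDot rest with
    | some (a, b) => some (c :: a, b)
    | none => if c = '.' then some ([], rest) else none

-- ===== PORT A =====
def stepA (st : PySem.Dict String (PySem.Set String) × PySem.Set String) (key : String) :
    PySem.Dict String (PySem.Set String) × PySem.Set String :=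
  if PySem.Str.startswith key "G." then
    -- key[2:] is an exact nonnegative slice: drop 2  (clamps like Python)
    match rsplitDot (key.toList.drop 2) with
    | some (t, i) =>
        let tag := String.ofList t
        let index := String.ofList i
        match st.1.get? tag with
        | some s => (st.1.insert tag (PySem.Set.add s index), st.2)
        | none => (st.1.insert tag (PySem.Set.ofList [index]), st.2)
    | none => st  -- Python raises NameError here (undefined GradeReportError); excluded by Pre_
  else if PySem.Str.startswith key "g." then
    (st.1, PySem.Set.add st.2 (String.ofList (key.toList.drop 2)))
  else st

def group_grades (all_keys : List String) : List String × (List (String × List String)) :=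
  let st := all_keys.foldl stepA (PySem.Dict.empty, PySem.Set.empty)
  -- dict comprehension over tags.items(): keys are the (distinct) keys of tags, in order
  (st.2, st.1.items.map (fun p => (p.1, PySem.List.sorted p.2 (fun x => x) true)))

-- ===== PORT B =====
def stepB (st : PySem.Set String × List (String × String)) (key : String) :
    PySem.Set String × List (String × String) :=
  if PySem.Str.startswith key "G." then
    match rsplitDot (key.toList.drop 2) with
    | some (t, i) => (st.1, st.2 ++ [(String.ofList t, String.ofList i)])
    | none => st  -- Python raises NameError here; excluded by Pre_
  else if PySem.Str.startswith key "g." then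
    (PySem.Set.add st.1 (String.ofList (key.toList.drop 2)), st.2)
  else st

def group_grades_alt (all_keys : List String) : List String × (List (String × List String)) :=
  let st := all_keys.foldl stepB (PySem.Set.empty, [])
  let spairs := PySem.List.sorted (PySem.List.dedup st.2) (fun p => p.2) true
  -- dict comprehension over the deduplicated tag list: distinct keys, in first-occurrence order
  (st.1, (PySem.List.dedup (st.2.map (fun p => p.1))).map
      (fun tag => (tag, (spairs.filter (fun p => p.1 == tag)).map (fun p => p.2))))

-- ===== PRECONDITION & SPEC =====
-- Pre_ excludes exactly the inputs on which Python A raises: some key starts with "G."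
-- but its remainder contains no '.', so rsplit(".", 1) yields one part and the reference
-- to the undefined GradeReportError raises NameError (B raises identically there).
def Pre_group_grades (all_keys : List String) : Prop :=
  ∀ k ∈ all_keys, PySem.Str.startswith k "G." = true → '.' ∈ k.toList.drop 2
instance (all_keys : List String) : Decidable (Pre_group_grades all_keys) := by
  unfold Pre_group_grades; infer_instance

def pvWitness_group_grades : List String := ["G.A.1", "G.A.2", "g.ma", "other"]

def Spec_group_grades (all_keys : List String) (out : List String × (List (String × List String))) : Prop := out = group_grades_alt all_keys
instance (all_keys : List String) (out : List String × (List (String × List String))) : Decidable (Spec_group_grades all_keys out) := by unfold Spec_group_grades; infer_instance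

-- ===== CLAIM (what is proved, stated in full; the proofs are below) =====
def Claim_equal_group_grades : Prop := ∀ (all_keys : List String), Dom_group_grades all_keys → Pre_group_grades all_keys → Spec_group_grades all_keys (group_grades all_keys)

-- ===== LEMMAS AND PROOFS =====

-- specification of A's `tags` dict contents in terms of B's flat pair list
def tagsSpec (pairs : List (String × String)) : List (String × PySem.Set String) :=
  (PySem.List.dedup (pairs.map (fun p => p.1))).map
    (fun t => (t, PySem.Set.ofList ((pairs.filter (fun p => p.1 == t)).map (fun p => p.2))))

theorem ofList_append_singleton {α : Type} [BEq α] (xs : List α) (x : α) :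
    PySem.Set.ofList (xs ++ [x]) = PySem.Set.add (PySem.Set.ofList xs) x := by
  rw [PySem.Set.ofList_eq_foldl, PySem.Set.ofList_eq_foldl, List.foldl_append]
  rfl

theorem tagsSpec_keys (pairs : List (String × String)) :
    (tagsSpec pairs).map (fun p => p.1) = PySem.List.dedup (pairs.map (fun p => p.1)) := by
  unfold tagsSpec
  rw [List.map_map]
  show List.map (fun t => t) _ = _
  exact List.map_id' _

theorem set_add_of_mem {α : Type} [BEq α] [LawfulBEq α] (s : PySem.Set α) (x : α) (h : x ∈ s) :
    PySem.Set.add s x = s := by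
  simp [PySem.Set.add, h]

theorem set_add_of_not_mem {α : Type} [BEq α] [LawfulBEq α] (s : PySem.Set α) (x : α) (h : x ∉ s) :
    PySem.Set.add s x = s ++ [x] := by
  simp [PySem.Set.add, h]

theorem filter_dedup_map_snd (pairs : List (String × String)) (t : String) :
    ((PySem.List.dedup pairs).filter (fun p => p.1 == t)).map (fun p => p.2)
      = PySem.List.dedup ((pairs.filter (fun p => p.1 == t)).map (fun p => p.2)) := by
  induction pairs using List.reverseRecOn with
  | nil => rfl
  | append_singleton qs p ih =>
    simp only [PySem.List.dedup] at *
    rw [ofList_append_singleton, List.filter_append, List.map_append]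
    by_cases hm : p ∈ qs
    · rw [set_add_of_mem _ _ ((PySem.Set.mem_ofList qs p).mpr hm)]
      by_cases ht : p.1 = t
      · have : List.filter (fun p => p.1 == t) [p] = [p] := by simp [ht]
        rw [this]
        simp only [List.map_cons, List.map_nil]
        rw [ofList_append_singleton, ih]
        have hmem : p.2 ∈ PySem.Set.ofList ((qs.filter (fun p => p.1 == t)).map (fun p => p.2)) := by
          rw [PySem.Set.mem_ofList]
          exact List.mem_map_of_mem (List.mem_filter.mpr ⟨hm, by simp [ht]⟩)
        rw [set_add_of_mem _ _ hmem]
      · have : List.filter (fun p => p.1 == t) [p] = [] := by simp [ht]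
        rw [this]
        simpa using ih
    · rw [set_add_of_not_mem _ _ (fun hc => hm ((PySem.Set.mem_ofList qs p).mp hc))]
      rw [List.filter_append]
      by_cases ht : p.1 = t
      · have : List.filter (fun p => p.1 == t) [p] = [p] := by simp [ht]
        rw [this]
        simp only [List.map_append, List.map_cons, List.map_nil]
        rw [ofList_append_singleton, ih]
        have hnmem : p.2 ∉ PySem.Set.ofList ((qs.filter (fun p => p.1 == t)).map (fun p => p.2)) := by
          rw [PySem.Set.mem_ofList]
          intro hc
          obtain ⟨q, hq, hq2⟩ := List.mem_map.mp hc
          obtain ⟨hqin, hqt⟩ := List.mem_filter.mp hq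
          apply hm
          have hq1 : q.1 = t := by simpa using hqt
          have : q = p := Prod.ext (by rw [hq1, ht]) hq2
          exact this ▸ hqin
        rw [set_add_of_not_mem _ _ hnmem]
      · have : List.filter (fun p => p.1 == t) [p] = [] := by simp [ht]
        rw [this]
        simpa using ih

theorem bucket_eq_sorted (pairs : List (String × String)) (t : String) :
    PySem.List.sorted
        (PySem.Set.ofList ((pairs.filter (fun p => p.1 == t)).map (fun p => p.2)))
        (fun x => x) true
      = (((PySem.List.sorted (PySem.List.dedup pairs) (fun p => p.2) true).filter
            (fun p => p.1 == t)).map (fun p => p.2)) := by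
  apply PySem.List.sorted_rev_eq_of_perm_of_pairwise_gt
  · -- permutation
    have h1 : (PySem.List.sorted (PySem.List.dedup pairs) (fun p => p.2) true).Perm
        (PySem.List.dedup pairs) := PySem.List.sorted_perm _ _ _
    have h2 := (h1.filter (fun p => p.1 == t)).map (fun p => p.2)
    rw [filter_dedup_map_snd] at h2
    exact h2.trans (by rw [PySem.List.dedup])
  · -- strictly descending on snd
    have hle : ((PySem.List.sorted (PySem.List.dedup pairs) (fun p => p.2) true).filter
        (fun p => p.1 == t)).Pairwise (fun a b => b.2 ≤ a.2) :=
      (PySem.List.sorted_pairwise_rev _ _).filter _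
    have hperm := ((PySem.List.sorted_perm (PySem.List.dedup pairs) (fun p => p.2) true).filter
        (fun p => p.1 == t)).map (fun p => p.2)
    have hnd : (((PySem.List.sorted (PySem.List.dedup pairs) (fun p => p.2) true).filter
        (fun p => p.1 == t)).map (fun p => p.2)).Nodup := by
      rw [hperm.nodup_iff, filter_dedup_map_snd pairs t]
      exact PySem.Set.nodup_ofList _
    rw [List.Nodup, List.pairwise_map] at hnd
    rw [List.pairwise_map]
    exact (hle.and hnd).imp (fun h => lt_of_le_of_ne h.1 (fun he => h.2 he.symm))

theorem tagsSpec_step (pairs : List (String × String)) (tags : PySem.Dict String (PySem.Set String))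
    (tag idx : String) (h : tags.items = tagsSpec pairs) :
    (match tags.get? tag with
      | some s => tags.insert tag (PySem.Set.add s idx)
      | none => tags.insert tag (PySem.Set.ofList [idx])).items
      = tagsSpec (pairs ++ [(tag, idx)]) := by
  have hkeys : tags.keys = PySem.List.dedup (pairs.map (fun p => p.1)) := by
    show tags.items.map _ = _
    rw [h]; exact tagsSpec_keys pairs
  have hnd : tags.keys.Nodup := by
    rw [hkeys]; exact PySem.Set.nodup_ofList _
  have hspec : tagsSpec (pairs ++ [(tag, idx)])
      = (PySem.Set.add (PySem.List.dedup (pairs.map (fun p => p.1))) tag).map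
          (fun t => (t, PySem.Set.ofList
            (((pairs.filter (fun p => p.1 == t)).map (fun p => p.2))
              ++ (if tag = t then [idx] else [])))) := by
    unfold tagsSpec
    rw [List.map_append, PySem.List.dedup]
    simp only [List.map_cons, List.map_nil]
    rw [ofList_append_singleton]
    refine List.map_congr_left (fun t _ => ?_)
    rw [List.filter_append, List.map_append]
    congr 2
    by_cases ht : tag = t <;> simp [ht]
  cases hget : tags.get? tag with
  | some s =>
    have hmemk : tag ∈ tags.keys := by
      by_contra hc
      rw [(PySem.Dict.get?_eq_none_iff_not_mem_keys tags tag).mpr hc] at hget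
      exact absurd hget (by simp)
    have hcont : tags.contains tag = true := by
      rw [PySem.Dict.contains_eq_isSome_get?, hget]; rfl
    have hs : s = PySem.Set.ofList ((pairs.filter (fun p => p.1 == tag)).map (fun p => p.2)) := by
      have hmem := PySem.Dict.mem_items_of_get?_eq_some tags hget
      rw [h] at hmem
      obtain ⟨t0, ht0, he⟩ := List.mem_map.mp hmem
      have : t0 = tag := congrArg Prod.fst he
      subst this
      exact (congrArg Prod.snd he).symm
    show (tags.insert tag (PySem.Set.add s idx)).items = _
    rw [PySem.Dict.items_insert_of_contains tags _ hcont, h, hspec]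
    have hmemd : tag ∈ PySem.List.dedup (pairs.map (fun p => p.1)) := hkeys ▸ hmemk
    rw [set_add_of_mem _ _ hmemd]
    unfold tagsSpec
    rw [List.map_map]
    refine List.map_congr_left (fun t htm => ?_)
    simp only [Function.comp]
    by_cases ht : t = tag
    · subst ht
      simp only [beq_self_eq_true, if_pos]
      rw [ofList_append_singleton, ← hs]
    · rw [if_neg (by simpa using ht), if_neg (fun hc => ht hc.symm), List.append_nil]
  | none =>
    have hnmemk : tag ∉ tags.keys := (PySem.Dict.get?_eq_none_iff_not_mem_keys tags tag).mp hget
    have hcont : tags.contains tag = false := by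
      rw [PySem.Dict.contains_eq_isSome_get?, hget]; rfl
    have hnmemd : tag ∉ PySem.List.dedup (pairs.map (fun p => p.1)) := hkeys ▸ hnmemk
    have hnmem : tag ∉ pairs.map (fun p => p.1) :=
      fun hc => hnmemd ((PySem.Set.mem_ofList _ _).mpr hc)
    show (tags.insert tag (PySem.Set.ofList [idx])).items = _
    rw [PySem.Dict.items_insert_of_not_contains tags _ hcont, h, hspec,
      set_add_of_not_mem _ _ hnmemd, List.map_append]
    congr 1
    · unfold tagsSpec
      refine List.map_congr_left (fun t htm => ?_)
      have ht : tag ≠ t := fun hc => hnmemd (hc ▸ htm)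
      rw [if_neg ht, List.append_nil]
    · have hfil : pairs.filter (fun p => p.1 == tag) = [] := by
        rw [List.filter_eq_nil_iff]
        exact fun p hp hc => hnmem (List.mem_map.mpr ⟨p, hp, by simpa using hc⟩)
      simp [hfil]

theorem step_pres (k : String) (tags : PySem.Dict String (PySem.Set String))
    (subj : PySem.Set String) (pairs : List (String × String))
    (h : tags.items = tagsSpec pairs) :
    (stepA (tags, subj) k).2 = (stepB (subj, pairs) k).1 ∧
    (stepA (tags, subj) k).1.items = tagsSpec ((stepB (subj, pairs) k).2) := by
  unfold stepA stepB
  by_cases hG : PySem.Str.startswith k "G." = true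
  · rw [if_pos hG, if_pos hG]
    cases hr : rsplitDot (k.toList.drop 2) with
    | none => simp only [hr]; exact ⟨trivial, h⟩
    | some ti =>
      obtain ⟨t0, i0⟩ := ti
      simp only [hr]
      have hstep := tagsSpec_step pairs tags (String.ofList t0) (String.ofList i0) h
      cases hget : tags.get? (String.ofList t0) with
      | some s =>
        simp only [hget] at hstep ⊢
        exact ⟨trivial, hstep⟩
      | none =>
        simp only [hget] at hstep ⊢
        exact ⟨trivial, hstep⟩
  · rw [if_neg hG, if_neg hG]
    by_cases hg : PySem.Str.startswith k "g." = true
    · rw [if_pos hg, if_pos hg]; exact ⟨rfl, h⟩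
    · rw [if_neg hg, if_neg hg]; exact ⟨rfl, h⟩

theorem loop_inv (l : List String) (tags : PySem.Dict String (PySem.Set String))
    (subj : PySem.Set String) (pairs : List (String × String))
    (h : tags.items = tagsSpec pairs) :
    (l.foldl stepA (tags, subj)).2 = (l.foldl stepB (subj, pairs)).1 ∧
    (l.foldl stepA (tags, subj)).1.items = tagsSpec ((l.foldl stepB (subj, pairs)).2) := by
  induction l generalizing tags subj pairs with
  | nil => exact ⟨rfl, h⟩
  | cons k rest ih =>
    simp only [List.foldl_cons]
    obtain ⟨h1, h2⟩ := step_pres k tags subj pairs h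
    have hB : stepB (subj, pairs) k = ((stepA (tags, subj) k).2, (stepB (subj, pairs) k).2) :=
      Prod.ext h1.symm rfl
    rw [hB]
    exact ih (stepA (tags, subj) k).1 (stepA (tags, subj) k).2 ((stepB (subj, pairs) k).2) h2

-- ===== VERDICT (by name: the statement is the Claim_ definition above) =====
theorem group_grades_spec : Claim_equal_group_grades := by
  intro all_keys _ _
  obtain ⟨h1, h2⟩ := loop_inv all_keys PySem.Dict.empty PySem.Set.empty [] rfl
  show (_, _) = (_, _)
  refine Prod.ext h1 ?_
  show ((List.foldl stepA (PySem.Dict.empty, PySem.Set.empty) all_keys).1.items.map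
      (fun p => (p.1, PySem.List.sorted p.2 (fun x => x) true))) = _
  rw [h2]
  unfold tagsSpec
  rw [List.map_map]
  refine List.map_congr_left (fun t _ => ?_)
  simp only [Function.comp]
  exact congrArg _ (bucket_eq_sorted _ t)
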